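-- pv_equiv track=rewrite | github.com/guardian/gu-email-renderer | template_filters.py | get_tone
-- ===== SOURCE A (Python) =====
-- def get_tone(content, is_container=False):
-- 	if not is_container:
-- 		d = {d["type"]: dict(d, index=i) for (i, d) in enumerate(content["tags"])}
-- 		if "tone" in d:
-- 			return d["tone"]["id"]
-- 		else:
-- 			return "Article"
-- 	else:
-- 		return "Article"
-- ===== SOURCE B (Python) =====
-- def get_tone(content, is_container=False):
--     if is_container:
--         return "Article"
--     for tag in reversed(content["tags"]):
--         if tag["type"] == "tone":
--             return tag["id"]
--     return "Article"
-- ===== Notes on version B (the rewrite author's own statement) =====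
-- stated objective: simpler
-- what changed: Instead of building a full type->tag dict over all tags (with unused enumerate indices), B scans the tags in reverse and returns the id of the first tone tag found (= the last tone tag, matching dict overwrite), else 'Article'.
import Mathlib
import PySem

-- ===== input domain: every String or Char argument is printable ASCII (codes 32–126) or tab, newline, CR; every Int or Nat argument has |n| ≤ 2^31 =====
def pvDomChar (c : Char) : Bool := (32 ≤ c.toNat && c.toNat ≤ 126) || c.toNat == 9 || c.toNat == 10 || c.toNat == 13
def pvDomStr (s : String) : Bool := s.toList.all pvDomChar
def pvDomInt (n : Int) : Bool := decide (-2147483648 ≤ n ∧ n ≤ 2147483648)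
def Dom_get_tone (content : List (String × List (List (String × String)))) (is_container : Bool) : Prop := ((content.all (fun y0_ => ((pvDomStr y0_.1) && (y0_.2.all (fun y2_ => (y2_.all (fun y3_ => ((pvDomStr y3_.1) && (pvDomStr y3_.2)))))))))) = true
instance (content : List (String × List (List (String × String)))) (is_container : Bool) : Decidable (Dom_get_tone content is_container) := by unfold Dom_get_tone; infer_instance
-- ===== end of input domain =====

-- B replaces A's full type->tag dict build by a reverse scan for the first tone tag (simpler; same value).
-- ===== PORT A =====
-- Python's dict lookup tag["k"] on an association-list dict is first-match lookup: List.lookup.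
-- The comprehension's dict(d, index=i) only adds the unused (and here untypeable) "index" entry;
-- the value's "id"/"type" lookups are those of the tag itself, so the tag list is stored as the value
-- and the enumerate index is dropped (it never affects the result).
def buildTypeDict (tags : List (List (String × String))) :
    PySem.Dict String (List (String × String)) :=
  tags.foldl (fun d t =>
    match t.lookup "type" with
    | some ty => d.insert ty t
    | none => d)   -- Python raises KeyError here; such inputs are excluded by Pre_get_tone
    PySem.Dict.empty

def get_tone (content : List (String × List (List (String × String)))) (is_container : Bool) : String :=
  if !is_container then
    match content.lookup "tags" with
    | none => ""   -- KeyError in Python; excluded by Pre_get_tone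
    | some tags =>
      let d := buildTypeDict tags
      match d.get? "tone" with
      | some t => (t.lookup "id").getD ""   -- getD "" only hit where Python raises KeyError (excluded by Pre_)
      | none => "Article"
  else "Article"

-- ===== PORT B =====
def findToneRev : List (List (String × String)) → String
  | [] => "Article"
  | t :: rest =>
    match t.lookup "type" with
    | none => ""   -- KeyError in Python; excluded by Pre_get_tone
    | some ty => if ty = "tone" then (t.lookup "id").getD "" else findToneRev rest

def get_tone_alt (content : List (String × List (List (String × String)))) (is_container : Bool) : String :=
  if is_container then "Article"
  else
    match content.lookup "tags" with
    | none => ""   -- KeyError in Python; excluded by Pre_get_tone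
    | some tags => findToneRev tags.reverse

-- ===== PRECONDITION & SPEC =====
-- Pre_ excludes exactly the inputs where Python A raises KeyError: content without a "tags" key,
-- a tag without a "type" key, or a last tone tag without an "id" key.
def Pre_get_tone (content : List (String × List (List (String × String)))) (is_container : Bool) : Prop :=
  is_container = true ∨
    ((content.lookup "tags").isSome = true ∧
     (∀ t ∈ (content.lookup "tags").getD [], (t.lookup "type").isSome = true) ∧
     (((content.lookup "tags").getD []).filter
        (fun t => t.lookup "type" == some "tone")).getLast?.all
          (fun t => (t.lookup "id").isSome) = true)
instance (content : List (String × List (List (String × String)))) (is_container : Bool) : Decidable (Pre_get_tone content is_container) := by unfold Pre_get_tone; infer_instance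

def pvWitness_get_tone : (List (String × List (List (String × String)))) × Bool :=
  ([("tags", [[("type", "tone"), ("id", "t/ok")]])], false)

def Spec_get_tone (content : List (String × List (List (String × String)))) (is_container : Bool) (out : String) : Prop := out = get_tone_alt content is_container
instance (content : List (String × List (List (String × String)))) (is_container : Bool) (out : String) : Decidable (Spec_get_tone content is_container out) := by unfold Spec_get_tone; infer_instance

-- ===== CLAIM (what is proved, stated in full; the proofs are below) =====
def Claim_equal_get_tone : Prop := ∀ (content : List (String × List (List (String × String)))) (is_container : Bool), Dom_get_tone content is_container → Pre_get_tone content is_container → Spec_get_tone content is_container (get_tone content is_container)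

-- ===== LEMMAS AND PROOFS =====

theorem pv_getLast?_cons_or {α : Type} (a : α) (l : List α) :
    (a :: l).getLast? = l.getLast?.or (some a) := by
  induction l with
  | nil => rfl
  | cons b bs ih =>
    rw [List.getLast?_cons_cons]
    cases h : (b :: bs).getLast? with
    | none => simp [List.getLast?_eq_none_iff] at h
    | some x => rfl

-- the dict built by A holds, at "tone", exactly the last tag whose "type" is "tone"
theorem pv_build_get_tone (tags : List (List (String × String)))
    (d : PySem.Dict String (List (String × String)))
    (h : ∀ t ∈ tags, (t.lookup "type").isSome = true) :
    (tags.foldl (fun d t =>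
        match t.lookup "type" with
        | some ty => d.insert ty t
        | none => d) d).get? "tone"
      = ((tags.filter (fun t => t.lookup "type" == some "tone")).getLast?).or
          (d.get? "tone") := by
  induction tags generalizing d with
  | nil => rfl
  | cons t rest ih =>
    obtain ⟨ty, hty⟩ := Option.isSome_iff_exists.mp (h t (by simp))
    have hrest : ∀ u ∈ rest, (u.lookup "type").isSome = true := fun u hu => h u (by simp [hu])
    simp only [List.foldl_cons, List.filter_cons, hty]
    by_cases hto : ty = "tone"
    · subst hto
      simp only [beq_self_eq_true, if_true]
      rw [ih _ hrest, pv_getLast?_cons_or, Option.or_assoc, Option.some_or,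
        PySem.Dict.get?_insert_self]
    · have hb : (some ty == some "tone") = false := by simp [hto]
      simp only [hb, Bool.false_eq_true, if_false]
      rw [ih _ hrest, PySem.Dict.get?_insert_of_ne _ _ (fun hh => hto hh.symm)]

-- B's reverse scan, under "every tag has a type", is find? on the reversed list
theorem pv_findToneRev_eq (l : List (List (String × String)))
    (h : ∀ t ∈ l, (t.lookup "type").isSome = true) :
    findToneRev l =
      match l.find? (fun t => t.lookup "type" == some "tone") with
      | some t => (t.lookup "id").getD ""
      | none => "Article" := by
  induction l with
  | nil => rfl
  | cons t rest ih =>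
    obtain ⟨ty, hty⟩ := Option.isSome_iff_exists.mp (h t (by simp))
    have hrest : ∀ u ∈ rest, (u.lookup "type").isSome = true := fun u hu => h u (by simp [hu])
    simp only [findToneRev, List.find?_cons, hty]
    by_cases hto : ty = "tone"
    · subst hto; simp
    · have hb : (some ty == some "tone") = false := by simp [hto]
      simp only [hb]
      simp [hto, ih hrest]

theorem pv_last_filter_eq_find_reverse {α : Type} (p : α → Bool) (l : List α) :
    (l.filter p).getLast? = l.reverse.find? p := by
  rw [List.getLast?_eq_head?_reverse, ← List.filter_reverse, List.head?_filter]

-- ===== VERDICT (by name: the statement is the Claim_ definition above) =====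
theorem get_tone_spec : Claim_equal_get_tone := by
  intro content is_container _ hpre
  unfold Spec_get_tone
  cases is_container with
  | true => rfl
  | false =>
    rcases hpre with h | ⟨hsome, htypes, _⟩
    · exact absurd h (by simp)
    cases hl : content.lookup "tags" with
    | none => simp [hl] at hsome
    | some tags =>
      rw [hl] at htypes
      simp only [Option.getD_some] at htypes
      have hrev : ∀ t ∈ tags.reverse, (t.lookup "type").isSome = true := by
        intro t ht; exact htypes t (List.mem_reverse.mp ht)
      simp only [get_tone, get_tone_alt, buildTypeDict, hl, Bool.not_false, reduceIte,
        Bool.false_eq_true, if_false]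
      rw [pv_build_get_tone tags PySem.Dict.empty htypes,
        pv_findToneRev_eq tags.reverse hrev,
        ← pv_last_filter_eq_find_reverse]
      simp only [PySem.Dict.get?_empty, Option.or_none]
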